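-- pv_equiv track=rewrite | github.com/bananahana720/data-extraction-tool | scripts/smoke_test_semantic.py | generate_test_corpus
-- ===== SOURCE A (Python) =====
-- from typing import List, Tuple
--
-- def generate_test_corpus(num_docs: int = 10, words_per_doc: int = 100) -> List[str]:
--     """Generate a test corpus for performance testing."""
--     # Create realistic document-like text
--     sample_sentences = [
--         "The enterprise data extraction pipeline processes documents efficiently.",
--         "Semantic analysis enables intelligent content understanding at scale.",
--         "Machine learning algorithms extract meaningful patterns from text data.",
--         "Document processing requires careful handling of diverse formats.",
--         "Natural language processing transforms unstructured data into insights.",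
--         "The modular architecture ensures scalable and maintainable systems.",
--         "Quality metrics validate the accuracy of extraction results.",
--         "Performance optimization reduces processing latency significantly.",
--         "Entity recognition identifies key information within documents.",
--         "Chunking strategies preserve semantic boundaries in text segmentation.",
--     ]
--
--     corpus = []
--     for i in range(num_docs):
--         # Build document by repeating and varying sentences
--         doc_sentences = []
--         word_count = 0
--         while word_count < words_per_doc:
--             sentence = sample_sentences[i % len(sample_sentences)]
--             # Add variation
--             if i % 2 == 0:
--                 sentence = sentence.replace("data", f"data_{i}")
--             doc_sentences.append(sentence)
--             word_count += len(sentence.split())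
--
--         corpus.append(" ".join(doc_sentences))
--
--     return corpus
-- ===== SOURCE B (Python) =====
-- from typing import List
--
-- def generate_test_corpus(num_docs: int = 10, words_per_doc: int = 100) -> List[str]:
--     """Generate a test corpus for performance testing (closed-form repetition count)."""
--     sample_sentences = [
--         "The enterprise data extraction pipeline processes documents efficiently.",
--         "Semantic analysis enables intelligent content understanding at scale.",
--         "Machine learning algorithms extract meaningful patterns from text data.",
--         "Document processing requires careful handling of diverse formats.",
--         "Natural language processing transforms unstructured data into insights.",
--         "The modular architecture ensures scalable and maintainable systems.",
--         "Quality metrics validate the accuracy of extraction results.",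
--         "Performance optimization reduces processing latency significantly.",
--         "Entity recognition identifies key information within documents.",
--         "Chunking strategies preserve semantic boundaries in text segmentation.",
--     ]
--
--     corpus = []
--     for i in range(num_docs):
--         sentence = sample_sentences[i % len(sample_sentences)]
--         if i % 2 == 0:
--             sentence = sentence.replace("data", f"data_{i}")
--         w = len(sentence.split())
--         n = max(0, -(-words_per_doc // w))  # ceil(words_per_doc / w), 0 when non-positive
--         corpus.append(" ".join([sentence] * n))
--     return corpus
-- ===== Notes on version B (the rewrite author's own statement) =====
-- stated objective: simpler
-- what changed: The inner while-loop that repeatedly appends the sentence and re-splits it to count words is replaced by computing the word count once and the repetition count n = max(0, ceil(words_per_doc / w)) in closed form, building the document as ' '.join([sentence] * n).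
import Mathlib
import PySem

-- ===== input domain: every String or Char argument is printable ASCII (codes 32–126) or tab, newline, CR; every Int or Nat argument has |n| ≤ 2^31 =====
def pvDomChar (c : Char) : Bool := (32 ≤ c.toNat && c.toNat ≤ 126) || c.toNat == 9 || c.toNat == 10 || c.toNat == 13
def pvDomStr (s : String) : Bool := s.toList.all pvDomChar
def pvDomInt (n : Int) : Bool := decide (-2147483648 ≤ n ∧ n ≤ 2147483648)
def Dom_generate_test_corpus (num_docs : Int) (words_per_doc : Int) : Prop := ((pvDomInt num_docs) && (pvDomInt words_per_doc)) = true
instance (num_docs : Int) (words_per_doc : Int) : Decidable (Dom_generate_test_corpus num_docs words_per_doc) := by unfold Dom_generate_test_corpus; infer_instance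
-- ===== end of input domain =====

-- B replaces A's inner word-counting while-loop by a closed-form repetition count
-- n = max(0, ceil(words_per_doc / w)) and builds each document as " ".join([sentence] * n);
-- objective: simpler (one split per document instead of one per appended sentence).

-- ===== PORT A =====
def sampleSentences : List String := [
  "The enterprise data extraction pipeline processes documents efficiently.",
  "Semantic analysis enables intelligent content understanding at scale.",
  "Machine learning algorithms extract meaningful patterns from text data.",
  "Document processing requires careful handling of diverse formats.",
  "Natural language processing transforms unstructured data into insights.",
  "The modular architecture ensures scalable and maintainable systems.",
  "Quality metrics validate the accuracy of extraction results.",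
  "Performance optimization reduces processing latency significantly.",
  "Entity recognition identifies key information within documents.",
  "Chunking strategies preserve semantic boundaries in text segmentation."]

-- A's 'while word_count < words_per_doc' loop; the Nat argument (words_per_doc.toNat) is only a
-- totality guard (fuel): every pass appends at least one word, so it never runs out
def docLoopA (i : Int) (target : Int) (wc : Int) (acc : List String) : Nat → List String
  | 0 => acc
  | fuel + 1 =>
    if wc < target then
      let s0 := PySem.List.pyGetD sampleSentences (PySem.Int.mod i (PySem.List.len sampleSentences)) ""
      let s := if PySem.Int.mod i 2 = 0 then PySem.Str.replace s0 "data" ("data_" ++ PySem.Int.toStr i) else s0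
      docLoopA i target (wc + PySem.List.len (PySem.Str.split₀ s)) (acc ++ [s]) fuel
    else acc

def generate_test_corpus (num_docs : Int) (words_per_doc : Int) : List String :=
  (PySem.List.pyRange 0 num_docs).foldl
    (fun corpus i => corpus ++ [PySem.Str.join " " (docLoopA i words_per_doc 0 [] words_per_doc.toNat)]) []

-- ===== PORT B =====
def generate_test_corpus_alt (num_docs : Int) (words_per_doc : Int) : List String :=
  (PySem.List.pyRange 0 num_docs).foldl
    (fun corpus i => corpus ++
      [let s0 := PySem.List.pyGetD sampleSentences (PySem.Int.mod i (PySem.List.len sampleSentences)) ""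
       let s := if PySem.Int.mod i 2 = 0 then PySem.Str.replace s0 "data" ("data_" ++ PySem.Int.toStr i) else s0
       let w := PySem.List.len (PySem.Str.split₀ s)
       let n := max 0 (-(PySem.Int.floordiv (-words_per_doc) w))
       PySem.Str.join " " (PySem.List.pyRepeat [s] n)]) []

-- ===== PRECONDITION & SPEC =====
def Spec_generate_test_corpus (num_docs : Int) (words_per_doc : Int) (out : List String) : Prop := out = generate_test_corpus_alt num_docs words_per_doc
instance (num_docs : Int) (words_per_doc : Int) (out : List String) : Decidable (Spec_generate_test_corpus num_docs words_per_doc out) := by unfold Spec_generate_test_corpus; infer_instance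

-- ===== CLAIM (what is proved, stated in full; the proofs are below) =====
def Claim_equal_generate_test_corpus : Prop := ∀ (num_docs : Int) (words_per_doc : Int), Dom_generate_test_corpus num_docs words_per_doc → Spec_generate_test_corpus num_docs words_per_doc (generate_test_corpus num_docs words_per_doc)

-- ===== LEMMAS AND PROOFS =====

-- the sentence both programs compute for document i
def sentOf (i : Int) : String :=
  let s0 := PySem.List.pyGetD sampleSentences (PySem.Int.mod i (PySem.List.len sampleSentences)) ""
  if PySem.Int.mod i 2 = 0 then PySem.Str.replace s0 "data" ("data_" ++ PySem.Int.toStr i) else s0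

-- split₀.go never returns [] once a word is open, the accumulator is nonempty,
-- or a non-space character is still ahead
lemma split₀_go_ne_nil (cs : List Char) : ∀ (cur : List Char) (acc : List (List Char)),
    (cur ≠ [] ∨ acc ≠ [] ∨ ∃ c ∈ cs, PySem.Chars.isspace c = false) →
    PySem.Chars.split₀.go cs cur acc ≠ [] := by
  induction cs with
  | nil =>
    intro cur acc h
    simp only [PySem.Chars.split₀.go]
    rcases h with h | h | ⟨c, hc, _⟩
    · simp [List.isEmpty_iff, h]
    · split <;> simp [h]
    · exact absurd hc (by simp)
  | cons c rest ih =>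
    intro cur acc h
    simp only [PySem.Chars.split₀.go]
    split
    · rename_i hsp
      split
      · rename_i hcur
        apply ih
        rcases h with h | h | ⟨d, hd, hns⟩
        · exact absurd (List.isEmpty_iff.mp hcur) h
        · exact Or.inr (Or.inl h)
        · rcases List.mem_cons.mp hd with rfl | hd
          · rw [hsp] at hns; exact absurd hns (by simp)
          · exact Or.inr (Or.inr ⟨d, hd, hns⟩)
      · exact ih _ _ (Or.inr (Or.inl (by simp)))
    · exact ih _ _ (Or.inl (by simp))

lemma split₀_pos (s : String) (h : ∃ c ∈ s.toList, PySem.Chars.isspace c = false) :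
    0 < (PySem.Str.split₀ s).length := by
  have := split₀_go_ne_nil s.toList [] [] (Or.inr (Or.inr h))
  simp only [PySem.Str.split₀, List.length_map, PySem.Chars.split₀]
  exact List.length_pos_iff.mpr this

lemma exists_nonspace_of_any (s : String) (h : (s.toList.any fun c => !PySem.Chars.isspace c) = true) :
    ∃ c ∈ s.toList, PySem.Chars.isspace c = false := by
  obtain ⟨c, hc, hcb⟩ := List.any_eq_true.mp h
  exact ⟨c, hc, by simpa using hcb⟩

-- the i-th sentence always contains a non-space character, hence has at least one word
set_option maxHeartbeats 4000000 in
set_option maxRecDepth 8192 in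
lemma sentOf_words_pos (i : Int) : 0 < (PySem.Str.split₀ (sentOf i)).length := by
  apply split₀_pos
  unfold sentOf
  have h10 : (0:Int) < PySem.List.len sampleSentences := by decide
  have hm0 : 0 ≤ PySem.Int.mod i (PySem.List.len sampleSentences) := PySem.Int.mod_nonneg _ h10
  have hm1 : PySem.Int.mod i (PySem.List.len sampleSentences) < 10 := PySem.Int.mod_lt _ h10
  rw [PySem.List.pyGetD_of_nonneg _ _ hm0]
  set k := (PySem.Int.mod i (PySem.List.len sampleSentences)).toNat with hk
  have hk10 : k < 10 := by omega
  split
  · interval_cases k <;>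
      · simp only [sampleSentences, List.getD, List.getElem?_cons_zero, List.getElem?_cons_succ,
          Option.getD_some, PySem.Str.toList_replace]
        simp [PySem.Chars.replace, PySem.Chars.replace.go]
        exact Or.inl (by decide)
  · interval_cases k <;> exact exists_nonspace_of_any _ (by decide)

-- one unfolding step of A's while-loop, with the sentence named
lemma docLoopA_succ (i target wc : Int) (acc : List String) (fuel : Nat) :
    docLoopA i target wc acc (fuel + 1) =
      if wc < target then
        docLoopA i target (wc + PySem.List.len (PySem.Str.split₀ (sentOf i))) (acc ++ [sentOf i]) fuel
      else acc := rfl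

-- A's while-loop produces exactly max(0, ceil((target - wc)/w)) copies of the sentence
lemma docLoopA_eq (i target : Int) :
    ∀ (fuel : Nat) (wc : Int) (acc : List String), (target - wc).toNat ≤ fuel →
    docLoopA i target wc acc fuel =
      acc ++ List.replicate (-((-(target - wc)) / ((PySem.Str.split₀ (sentOf i)).length : Int))).toNat (sentOf i) := by
  have hw : (0:Int) < ((PySem.Str.split₀ (sentOf i)).length : Int) := by
    exact_mod_cast sentOf_words_pos i
  set w : Int := ((PySem.Str.split₀ (sentOf i)).length : Int) with hwdef
  intro fuel
  induction fuel with
  | zero =>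
    intro wc acc hfuel
    have hd : target - wc ≤ 0 := by omega
    have h1 : 0 ≤ (-(target - wc)) / w := Int.ediv_nonneg (by omega) hw.le
    simp only [docLoopA]
    rw [show (-((-(target - wc)) / w)).toNat = 0 by omega]
    simp
  | succ fuel ih =>
    intro wc acc hfuel
    rw [docLoopA_succ]
    split
    · rename_i h
      have hlen : PySem.List.len (PySem.Str.split₀ (sentOf i)) = w := by
        rw [PySem.List.len_eq]
      rw [hlen, ih (wc + w) (acc ++ [sentOf i]) (by omega)]
      have hshift : (-(target - wc)) / w = (-(target - (wc + w))) / w + (-1) := by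
        have := Int.add_mul_ediv_right (-(target - (wc + w))) (-1) hw.ne'
        rw [← this]; ring_nf
      have hnn : 0 ≤ -((-(target - (wc + w))) / w) := by
        have : (-(target - (wc + w))) / w < 1 := by
          rw [Int.ediv_lt_iff_lt_mul hw]; omega
        have h0 : (-(target - (wc + w))) / w ≤ 0 := by omega
        omega
      rw [show (-((-(target - wc)) / w)).toNat = (-((-(target - (wc + w))) / w)).toNat + 1 by omega]
      simp [List.replicate_succ, List.append_assoc]
    · rename_i h
      have h1 : 0 ≤ (-(target - wc)) / w := Int.ediv_nonneg (by omega) hw.le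
      rw [show (-((-(target - wc)) / w)).toNat = 0 by omega]
      simp

-- ===== VERDICT (by name: the statement is the Claim_ definition above) =====
theorem generate_test_corpus_spec : Claim_equal_generate_test_corpus := by
  intro num_docs words_per_doc _
  unfold Spec_generate_test_corpus generate_test_corpus generate_test_corpus_alt
  rw [PySem.List.foldl_append_singleton_eq_map
        (f := fun i => PySem.Str.join " " (docLoopA i words_per_doc 0 [] words_per_doc.toNat)),
      PySem.List.foldl_append_singleton_eq_map]
  simp only [List.nil_append]
  apply List.map_congr_left
  intro i _
  have hw : (0:Int) < ((PySem.Str.split₀ (sentOf i)).length : Int) := by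
    exact_mod_cast sentOf_words_pos i
  rw [docLoopA_eq i words_per_doc words_per_doc.toNat 0 [] (by omega)]
  show PySem.Str.join " " ([] ++ List.replicate
        (-((-(words_per_doc - 0)) / ((PySem.Str.split₀ (sentOf i)).length : Int))).toNat (sentOf i)) =
      PySem.Str.join " " (PySem.List.pyRepeat [sentOf i]
        (max 0 (-(PySem.Int.floordiv (-words_per_doc) (PySem.List.len (PySem.Str.split₀ (sentOf i)))))))
  rw [PySem.List.pyRepeat_singleton, PySem.List.len_eq, PySem.Int.floordiv_eq_ediv_of_pos hw]
  rw [show words_per_doc - 0 = words_per_doc from by ring]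
  congr 1
  simp only [List.nil_append]
  congr 1
  generalize (-words_per_doc) / ((PySem.Str.split₀ (sentOf i)).length : Int) = q
  omega
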